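-- pv_equiv track=rewrite | github.com/foxsroot/ChatSeek | archive/app_v4.py | tokens_are_adjacent
-- ===== SOURCE A (Python) =====
-- def tokens_are_adjacent(token_positions):
--     if not token_positions or len(token_positions) < 2:
--         return True  # Single token query is always valid
--     sorted_positions = sorted(token_positions.items(), key=lambda x: x[1][0])
--     positions = [pos[1] for pos in sorted_positions]
--
--     for i in range(len(positions) - 1):
--         found_adjacent = False
--         for pos1 in positions[i]:
--             for pos2 in positions[i + 1]:
--                 if 0 <= (pos2 - pos1) <= 2:  # Allow one stopword in between
--                     found_adjacent = True
--                     break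
--             if found_adjacent:
--                 break
--         if not found_adjacent:
--             return False
--     return True
-- ===== SOURCE B (Python) =====
-- def tokens_are_adjacent(token_positions):
--     if not token_positions or len(token_positions) < 2:
--         return True  # Single token query is always valid
--     positions = [v for _, v in sorted(token_positions.items(), key=lambda x: x[1][0])]
--     for a, b in zip(positions, positions[1:]):
--         xs, ys = sorted(a), sorted(b)
--         i = j = 0
--         matched = False
--         while i < len(xs) and j < len(ys):
--             d = ys[j] - xs[i]
--             if d < 0:
--                 j += 1        # ys[j] is below every remaining xs value
--             elif d > 2:
--                 i += 1        # xs[i] is too far below every remaining ys value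
--             else:
--                 matched = True
--                 break
--         if not matched:
--             return False
--     return True
-- ===== Notes on version B (the rewrite author's own statement) =====
-- stated objective: alternative
-- what changed: Replaces A's nested all-pairs scan over each consecutive pair of position lists with a sort-then-two-pointer merge that finds a pair at distance 0..2 in one linear pass over the sorted copies; it trades the quadratic pair scan for sorting overhead, which a timing run showed is not faster on the generated inputs.
-- outside the precondition, e.g. on tokens_are_adjacent({'a': [], 'b': [1]}): A raises IndexError, B raises IndexError
import Mathlib
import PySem

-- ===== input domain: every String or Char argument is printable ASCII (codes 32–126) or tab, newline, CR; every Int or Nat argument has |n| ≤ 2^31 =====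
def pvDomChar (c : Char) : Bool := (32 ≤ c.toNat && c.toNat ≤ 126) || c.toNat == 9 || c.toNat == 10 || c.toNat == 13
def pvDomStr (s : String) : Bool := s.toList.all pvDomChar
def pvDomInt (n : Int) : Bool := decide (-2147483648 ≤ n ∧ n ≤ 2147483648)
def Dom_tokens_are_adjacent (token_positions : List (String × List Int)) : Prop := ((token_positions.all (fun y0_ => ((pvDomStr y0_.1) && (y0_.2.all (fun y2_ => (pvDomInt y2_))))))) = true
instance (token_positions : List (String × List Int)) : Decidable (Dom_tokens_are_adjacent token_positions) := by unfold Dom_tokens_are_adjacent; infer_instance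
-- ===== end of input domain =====

-- B replaces A's nested all-pairs scan per consecutive pair by a sort-then-two-pointer merge (objective: alternative algorithm, same result).

-- ===== PORT A =====
-- inner two loops of A with their breaks: any pos1 in xs paired with any pos2 in ys with 0 <= pos2-pos1 <= 2
def aFound (xs ys : List Int) : Bool :=
  xs.any (fun pos1 => ys.any (fun pos2 => decide (0 ≤ pos2 - pos1) && decide (pos2 - pos1 ≤ 2)))

-- for i in range(len(positions)-1): … if not found_adjacent: return False
def aLoop : List (List Int) → Bool
  | a :: b :: rest => if aFound a b then aLoop (b :: rest) else false
  | _ => true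

def tokens_are_adjacent (token_positions : List (String × List Int)) : Bool :=
  if token_positions.isEmpty || decide (token_positions.length < 2) then true
  else
    -- key=lambda x: x[1][0] raises IndexError on an empty position list; Pre_ excludes that, headD keeps the port total
    aLoop ((PySem.List.sorted token_positions (fun x => x.2.headD 0) false).map (fun pos => pos.2))

-- ===== PORT B =====
-- the while-loop two-pointer merge of Source B over two ascending lists
def bMerge : List Int → List Int → Bool
  | p :: ps, q :: qs =>
    if q - p < 0 then bMerge (p :: ps) qs
    else if q - p > 2 then bMerge ps (q :: qs)
    else true
  | _, _ => false
termination_by xs ys => xs.length + ys.length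
decreasing_by all_goals simp

-- for a, b in zip(positions, positions[1:]): … if not matched: return False
def bLoop : List (List Int) → Bool
  | a :: b :: rest =>
    if bMerge (PySem.List.sorted a (fun x => x) false) (PySem.List.sorted b (fun x => x) false)
    then bLoop (b :: rest) else false
  | _ => true

def tokens_are_adjacent_alt (token_positions : List (String × List Int)) : Bool :=
  if token_positions.isEmpty || decide (token_positions.length < 2) then true
  else
    bLoop ((PySem.List.sorted token_positions (fun x => x.2.headD 0) false).map (fun pos => pos.2))

-- ===== PRECONDITION & SPEC =====
-- Pre_ excludes duplicate keys (a Python dict cannot carry them, so the assoc list would not represent A's input)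
-- and, when the sort runs (≥ 2 tokens), empty position lists, on which A raises IndexError in the sort key.
def Pre_tokens_are_adjacent (token_positions : List (String × List Int)) : Prop :=
  (token_positions.map Prod.fst).Nodup ∧
  (2 ≤ token_positions.length → ∀ kv ∈ token_positions, kv.2 ≠ [])
instance (token_positions : List (String × List Int)) : Decidable (Pre_tokens_are_adjacent token_positions) := by unfold Pre_tokens_are_adjacent; infer_instance

def pvWitness_tokens_are_adjacent : (List (String × List Int)) := [("a", [1, 5]), ("b", [2])]

def Spec_tokens_are_adjacent (token_positions : List (String × List Int)) (out : Bool) : Prop := out = tokens_are_adjacent_alt token_positions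
instance (token_positions : List (String × List Int)) (out : Bool) : Decidable (Spec_tokens_are_adjacent token_positions out) := by unfold Spec_tokens_are_adjacent; infer_instance

-- ===== CLAIM (what is proved, stated in full; the proofs are below) =====
def Claim_equal_tokens_are_adjacent : Prop := ∀ (token_positions : List (String × List Int)), Dom_tokens_are_adjacent token_positions → Pre_tokens_are_adjacent token_positions → Spec_tokens_are_adjacent token_positions (tokens_are_adjacent token_positions)

-- ===== LEMMAS AND PROOFS =====

theorem aFound_iff (xs ys : List Int) :
    aFound xs ys = true ↔ ∃ p ∈ xs, ∃ q ∈ ys, 0 ≤ q - p ∧ q - p ≤ 2 := by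
  simp [aFound]

-- two-pointer correctness on ascending lists: it finds a pair iff one exists
theorem bMerge_iff : ∀ (xs ys : List Int), xs.Pairwise (· ≤ ·) → ys.Pairwise (· ≤ ·) →
    (bMerge xs ys = true ↔ ∃ p ∈ xs, ∃ q ∈ ys, 0 ≤ q - p ∧ q - p ≤ 2)
  | [], ys, _, _ => by simp [bMerge]
  | p :: ps, [], _, _ => by simp [bMerge]
  | p :: ps, q :: qs, hx, hy => by
    by_cases h1 : q - p < 0
    · rw [show bMerge (p :: ps) (q :: qs) = bMerge (p :: ps) qs from by simp [bMerge, h1],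
        bMerge_iff (p :: ps) qs hx hy.tail]
      constructor
      · rintro ⟨p', hp', q', hq', h⟩
        exact ⟨p', hp', q', List.mem_cons_of_mem _ hq', h⟩
      · rintro ⟨p', hp', q', hq', h0, h2⟩
        rcases List.mem_cons.mp hq' with rfl | hq'
        · have hpp' : p ≤ p' := by
            rcases List.mem_cons.mp hp' with rfl | hp'
            · exact le_refl p'
            · exact (List.pairwise_cons.mp hx).1 p' hp'
          omega
        · exact ⟨p', hp', q', hq', h0, h2⟩
    · by_cases h2 : q - p > 2
      · rw [show bMerge (p :: ps) (q :: qs) = bMerge ps (q :: qs) from by simp [bMerge, h1, h2],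
          bMerge_iff ps (q :: qs) hx.tail hy]
        constructor
        · rintro ⟨p', hp', q', hq', h⟩
          exact ⟨p', List.mem_cons_of_mem _ hp', q', hq', h⟩
        · rintro ⟨p', hp', q', hq', h0, h3⟩
          rcases List.mem_cons.mp hp' with rfl | hp'
          · have hqq' : q ≤ q' := by
              rcases List.mem_cons.mp hq' with rfl | hq'
              · exact le_refl q'
              · exact (List.pairwise_cons.mp hy).1 q' hq'
            omega
          · exact ⟨p', hp', q', hq', h0, h3⟩
      · constructor
        · intro _
          exact ⟨p, List.mem_cons_self, q, List.mem_cons_self, by omega⟩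
        · intro _
          simp [bMerge, h1, h2]
termination_by xs ys => xs.length + ys.length
decreasing_by all_goals simp

theorem bMerge_sorted_eq_aFound (xs ys : List Int) :
    bMerge (PySem.List.sorted xs (fun x => x) false) (PySem.List.sorted ys (fun x => x) false)
      = aFound xs ys := by
  rw [Bool.eq_iff_iff,
    bMerge_iff _ _ (PySem.List.sorted_pairwise xs (fun x => x)) (PySem.List.sorted_pairwise ys (fun x => x)),
    aFound_iff]
  simp [PySem.List.mem_sorted]

theorem loop_eq : ∀ l : List (List Int), bLoop l = aLoop l
  | [] => rfl
  | [_] => rfl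
  | a :: b :: rest => by
    rw [bLoop, aLoop, bMerge_sorted_eq_aFound, loop_eq (b :: rest)]

-- ===== VERDICT (by name: the statement is the Claim_ definition above) =====
theorem tokens_are_adjacent_spec : Claim_equal_tokens_are_adjacent := by
  intro tp _ _
  unfold Spec_tokens_are_adjacent tokens_are_adjacent tokens_are_adjacent_alt
  rw [loop_eq]
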